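-- pv_equiv track=rewrite | github.com/LeonardoBonanno/SummerResearch2020 | Code/alternativeGenAltPerm.py | generateY
-- ===== SOURCE A (Python) =====
-- def generateY(X, forward, n):
--     Y = [0] * n
--     increment, start = (1, 0) if forward else (-1, n - 1)
--     for i in range(n):
--         if i % 2 == 0:
--             Y[i]= X[start + increment * i]
--         else:
--             Y[i] = 1 - X[start + increment * i]
--     return Y
-- ===== SOURCE B (Python) =====
-- def generateY(X, forward, n):
--     if n <= 0:
--         return []
--     src = X[:n] if forward else X[:n][::-1]
--     out = []
--     it = iter(src)
--     for a in it:
--         out.append(a)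
--         b = next(it, None)
--         if b is None:
--             break
--         out.append(1 - b)
--     return out
-- ===== Notes on version B (the rewrite author's own statement) =====
-- stated objective: alternative
-- what changed: B replaces A's preallocated [0]*n array filled by an indexed loop with start/increment arithmetic and a parity test by slicing the prefix X[:n] (reversed when not forward) and consuming it two elements at a time, appending the first unchanged and the second bit-flipped.
import Mathlib
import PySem

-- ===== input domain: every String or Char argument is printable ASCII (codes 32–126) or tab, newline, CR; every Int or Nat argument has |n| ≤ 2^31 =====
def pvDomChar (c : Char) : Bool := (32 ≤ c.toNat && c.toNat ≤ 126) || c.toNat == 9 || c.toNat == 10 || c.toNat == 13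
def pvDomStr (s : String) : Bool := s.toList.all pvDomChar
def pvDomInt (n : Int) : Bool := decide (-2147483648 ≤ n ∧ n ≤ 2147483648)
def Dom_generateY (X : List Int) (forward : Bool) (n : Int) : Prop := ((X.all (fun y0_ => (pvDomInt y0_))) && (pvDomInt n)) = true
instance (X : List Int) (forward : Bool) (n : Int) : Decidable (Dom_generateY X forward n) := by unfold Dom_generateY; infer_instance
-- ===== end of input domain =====

-- B takes the direction flag as an explicit prefix-slice + reversal and consumes the source
-- two elements at a time, removing A's index arithmetic and parity test (objective: alternative).

-- ===== PORT A =====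
def generateY (X : List Int) (forward : Bool) (n : Int) : List Int :=
  let Y : List Int := List.replicate n.toNat 0        -- [0] * n
  let increment : Int := if forward then 1 else -1
  let start : Int := if forward then 0 else n - 1
  (PySem.List.pyRange 0 n 1).foldl
    (fun Y i =>
      if i % 2 == 0 then
        PySem.List.pySetD Y i (PySem.List.pyGetD X (start + increment * i) 0)
      else
        PySem.List.pySetD Y i (1 - PySem.List.pyGetD X (start + increment * i) 0))
    Y

-- ===== PORT B =====
-- the for-loop over iter(src) taking two elements per round
def pairsFlip : List Int → List Int
  | [] => []
  | [a] => [a]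
  | a :: b :: rest => a :: (1 - b) :: pairsFlip rest

def generateY_alt (X : List Int) (forward : Bool) (n : Int) : List Int :=
  if n ≤ 0 then []
  else
    -- X[:n] resp. X[:n][::-1] (cf. PySem.List.slice?_none_none_neg_one: s[::-1] is reverse)
    let src := if forward then PySem.List.slice X none (some n)
               else (PySem.List.slice X none (some n)).reverse
    pairsFlip src

-- ===== PRECONDITION & SPEC =====
-- A raises IndexError as soon as it reads past the end of X, i.e. exactly when n > len(X).
def Pre_generateY (X : List Int) (forward : Bool) (n : Int) : Prop := n ≤ (X.length : Int)
instance (X : List Int) (forward : Bool) (n : Int) : Decidable (Pre_generateY X forward n) := by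
  unfold Pre_generateY; infer_instance

def pvWitness_generateY : List Int × Bool × Int := ([0, 1, 1], false, 3)

def Spec_generateY (X : List Int) (forward : Bool) (n : Int) (out : List Int) : Prop := out = generateY_alt X forward n
instance (X : List Int) (forward : Bool) (n : Int) (out : List Int) : Decidable (Spec_generateY X forward n out) := by unfold Spec_generateY; infer_instance

-- ===== CLAIM (what is proved, stated in full; the proofs are below) =====
def Claim_equal_generateY : Prop := ∀ (X : List Int) (forward : Bool) (n : Int), Dom_generateY X forward n → Pre_generateY X forward n → Spec_generateY X forward n (generateY X forward n)


-- ===== LEMMAS AND PROOFS =====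

theorem pairsFlip_eq (s : List Int) :
    pairsFlip s = (List.range s.length).map
      (fun k => if k % 2 = 0 then s.getD k 0 else 1 - s.getD k 0) := by
  induction s using pairsFlip.induct with
  | case1 => simp [pairsFlip]
  | case2 a => simp [pairsFlip]
  | case3 a b rest ih =>
    simp only [pairsFlip, List.length_cons, List.range_succ_eq_map, List.map_cons,
      List.map_map]
    refine congrArg₂ _ (by norm_num) (congrArg₂ _ (by norm_num) ?_)
    rw [ih]
    refine List.map_congr_left (fun k _ => ?_)
    simp only [Function.comp, Nat.succ_eq_add_one]
    have hpar : (k + 1 + 1) % 2 = k % 2 := by omega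
    simp [hpar]

theorem set_append_len (A : List Int) (y v : Int) (t : List Int) (j : Nat)
    (hj : j = A.length) : (A ++ y :: t).set j v = A ++ v :: t := by
  subst hj
  induction A with
  | nil => simp
  | cons a A ih => simp [ih]

theorem foldl_set_prefix (g : Int → Int) (m : Nat) (Y0 : List Int) (h : m ≤ Y0.length) :
    (PySem.List.pyRange 0 (m : Int) 1).foldl (fun Y i => PySem.List.pySetD Y i (g i)) Y0
      = (List.range m).map (fun (k : Nat) => g (k : Int)) ++ Y0.drop m := by
  induction m with
  | zero => simp [PySem.List.pyRange_one_eq_nil]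
  | succ m ih =>
    have hcast : ((m + 1 : Nat) : Int) = (m : Int) + 1 := by push_cast; ring
    rw [hcast, PySem.List.pyRange_one_succ_right (by omega : (0:Int) ≤ (m:Int)),
        List.foldl_append, ih (by omega)]
    have hdrop : Y0.drop m = Y0[m]'(by omega) :: Y0.drop (m + 1) :=
      (List.getElem_cons_drop (by omega)).symm
    rw [List.foldl_cons, List.foldl_nil, PySem.List.pySetD_natCast, hdrop,
        set_append_len _ _ _ _ m (by simp), List.range_succ, List.map_append]
    simp

-- ===== VERDICT (by name: the statement is the Claim_ definition above) =====
theorem generateY_spec : Claim_equal_generateY := by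
  intro X forward n _hDom hPre
  unfold Spec_generateY generateY generateY_alt
  unfold Pre_generateY at hPre
  by_cases hn : n ≤ 0
  · cases forward <;>
      simp [PySem.List.pyRange_one_eq_nil hn, Int.toNat_of_nonpos hn, hn]
  · rw [not_le] at hn
    rw [if_neg (not_le.mpr hn)]
    have hnm : n = (n.toNat : Int) := by omega
    rw [hnm] at hPre ⊢
    set m := n.toNat with hm
    have hmlen : m ≤ X.length := by exact_mod_cast hPre
    have hslice : PySem.List.slice X none (some (m : Int)) = X.take m := by
      rw [PySem.List.slice_to_natCast]
    have hlen_take : (X.take m).length = m := by simp [hmlen]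
    -- pull the parity branch inside the single write Y[i] = …
    have hfun : ∀ (st inc : Int),
        (fun (Y : List Int) (i : Int) =>
          if i % 2 == 0 then
            PySem.List.pySetD Y i (PySem.List.pyGetD X (st + inc * i) 0)
          else
            PySem.List.pySetD Y i (1 - PySem.List.pyGetD X (st + inc * i) 0)) =
        (fun (Y : List Int) (i : Int) =>
          PySem.List.pySetD Y i
            (if i % 2 == 0 then PySem.List.pyGetD X (st + inc * i) 0
             else 1 - PySem.List.pyGetD X (st + inc * i) 0)) := by
      intro st inc; funext Y i; split <;> rfl
    cases forward
    · -- backward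
      simp only [Bool.false_eq_true, if_false, hfun, Int.toNat_natCast, hslice]
      rw [foldl_set_prefix _ m (List.replicate m 0) (by simp), pairsFlip_eq,
          List.length_reverse, hlen_take]
      simp only [List.drop_replicate, Nat.sub_self, List.replicate_zero, List.append_nil]
      refine List.map_congr_left (fun k hk => ?_)
      have hk' : k < m := List.mem_range.mp hk
      have hidx : (m : Int) - 1 + -(k : Int) = ((m - 1 - k : Nat) : Int) := by
        push_cast [Nat.cast_sub (by omega : k ≤ m - 1), Nat.cast_sub (by omega : 1 ≤ m)]
        ring
      have hget : PySem.List.pyGetD X (((m - 1 - k : Nat) : Int)) 0 = X.getD (m - 1 - k) 0 :=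
        PySem.List.pyGetD_natCast ..
      have hsrc : ((X.take m).reverse).getD k 0 = X.getD (m - 1 - k) 0 := by
        simp only [List.getD]
        rw [List.getElem?_reverse (by omega : k < (X.take m).length)]
        rw [hlen_take]
        simp [List.getElem?_take, show m - 1 - k < m by omega]
      simp only [List.getD] at hsrc hget
      by_cases h2 : k % 2 = 0
      · have h2i : (k : Int) % 2 = 0 := by omega
        simp [h2, h2i, hidx, hget, hsrc, List.getD]
      · have h2i : ¬ ((k : Int) % 2 = 0) := by omega
        simp [h2, h2i, hidx, hget, hsrc, List.getD]
    · -- forward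
      simp only [if_true, hfun, Int.toNat_natCast, hslice]
      rw [foldl_set_prefix _ m (List.replicate m 0) (by simp), pairsFlip_eq, hlen_take]
      simp only [List.drop_replicate, Nat.sub_self, List.replicate_zero, List.append_nil]
      refine List.map_congr_left (fun k hk => ?_)
      have hk' : k < m := List.mem_range.mp hk
      have hidx : (0 : Int) + 1 * (k : Int) = (k : Int) := by ring
      have hget : PySem.List.pyGetD X ((k : Int)) 0 = X.getD k 0 :=
        PySem.List.pyGetD_natCast ..
      have hsrc : (X.take m).getD k 0 = X.getD k 0 := by
        simp [List.getD, List.getElem?_take, hk']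
      simp only [List.getD] at hsrc hget
      by_cases h2 : k % 2 = 0
      · have h2i : (k : Int) % 2 = 0 := by omega
        simp [h2, h2i, hidx, hget, hsrc, List.getD]
      · have h2i : ¬ ((k : Int) % 2 = 0) := by omega
        simp [h2, h2i, hidx, hget, hsrc, List.getD]
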